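-- pv_equiv track=rewrite | github.com/Ottovon-Bis89/Functional_software_for-Genome_Evolution | Supplementary_Code/Evolver.py | apply_insertion
-- ===== SOURCE A (Python) =====
-- def apply_insertion(genome, element, position):
--     """Insert an element at a specific position in the genome."""
--     # Find the target chromosome and position
--     total_length = 0
--     for chrom_idx, chromosome in enumerate(genome):
--         if total_length + len(chromosome) > position:
--             pos_in_chrom = position - total_length
--             chromosome.insert(pos_in_chrom, element)
--             break
--         total_length += len(chromosome)
--     return genome
-- ===== SOURCE B (Python) =====
-- def apply_insertion(genome, element, position):
--     """Insert an element at a specific position in the genome.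
--
--     Prefix-sum + binary-search re-implementation (mutates the target
--     chromosome in place, like the original)."""
--     cum = []
--     total = 0
--     for chrom in genome:
--         total += len(chrom)
--         cum.append(total)
--     # hand-written bisect_right(cum, position)
--     lo, hi = 0, len(cum)
--     while lo < hi:
--         mid = (lo + hi) // 2
--         if cum[mid] <= position:
--             lo = mid + 1
--         else:
--             hi = mid
--     if lo < len(genome):
--         genome[lo].insert(position - (cum[lo] - len(genome[lo])), element)
--     return genome
-- ===== Notes on version B (the rewrite author's own statement) =====
-- stated objective: alternative
-- what changed: Replaces the running-total scan-with-break by a prefix-sum table of chromosome lengths plus a hand-written bisect_right binary search that locates the target chromosome, followed by one indexed insert.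
import Mathlib
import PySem

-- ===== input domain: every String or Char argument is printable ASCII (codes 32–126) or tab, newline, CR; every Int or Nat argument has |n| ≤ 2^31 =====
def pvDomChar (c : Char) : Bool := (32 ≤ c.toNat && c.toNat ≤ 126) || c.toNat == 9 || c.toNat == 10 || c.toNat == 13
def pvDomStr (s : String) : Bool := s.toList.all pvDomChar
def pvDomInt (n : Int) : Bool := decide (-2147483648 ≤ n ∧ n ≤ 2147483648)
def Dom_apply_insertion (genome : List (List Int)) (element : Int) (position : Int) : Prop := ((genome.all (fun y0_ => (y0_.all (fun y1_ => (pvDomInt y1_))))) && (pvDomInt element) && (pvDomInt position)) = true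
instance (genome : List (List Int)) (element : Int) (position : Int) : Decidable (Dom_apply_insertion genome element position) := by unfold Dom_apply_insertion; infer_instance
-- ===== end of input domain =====

-- B replaces A's running-total scan by prefix sums + binary search (objective: alternative decomposition;
-- same cost class). Both Pythons mutate the target chromosome in place; the equivalence proved here is
-- about the returned value.

-- ===== PORT A =====
-- the for-loop with running total and break, as structural recursion (break = stop recursing)
def pvInsA (e pos : Int) : List (List Int) → Int → List (List Int)
  | [], _ => []
  | c :: rest, total =>
    if total + (c.length : Int) > pos then
      PySem.List.insert c (pos - total) e :: rest
    else
      c :: pvInsA e pos rest (total + (c.length : Int))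

def apply_insertion (genome : List (List Int)) (element : Int) (position : Int) : List (List Int) :=
  pvInsA element position genome 0

-- ===== PORT B =====
-- cum = running prefix sums of chromosome lengths
def pvCum : List (List Int) → Int → List Int
  | [], _ => []
  | c :: rest, t => (t + (c.length : Int)) :: pvCum rest (t + (c.length : Int))

-- the hand-written bisect_right while-loop of Source B
def pvBisect (cum : List Int) (pos : Int) (lo hi : Nat) : Nat :=
  if lo < hi then
    let mid := (lo + hi) / 2
    if cum.getD mid 0 ≤ pos then pvBisect cum pos (mid + 1) hi
    else pvBisect cum pos lo mid
  else lo
termination_by hi - lo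
decreasing_by all_goals omega

def apply_insertion_alt (genome : List (List Int)) (element : Int) (position : Int) : List (List Int) :=
  let cum := pvCum genome 0
  let lo := pvBisect cum position 0 cum.length
  if lo < genome.length then
    genome.set lo
      (PySem.List.insert (genome.getD lo [])
        (position - (cum.getD lo 0 - ((genome.getD lo []).length : Int))) element)
  else genome

-- ===== PRECONDITION & SPEC =====
def Spec_apply_insertion (genome : List (List Int)) (element : Int) (position : Int) (out : List (List Int)) : Prop := out = apply_insertion_alt genome element position
instance (genome : List (List Int)) (element : Int) (position : Int) (out : List (List Int)) : Decidable (Spec_apply_insertion genome element position out) := by unfold Spec_apply_insertion; infer_instance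

-- ===== CLAIM (what is proved, stated in full; the proofs are below) =====
def Claim_equal_apply_insertion : Prop := ∀ (genome : List (List Int)) (element : Int) (position : Int), Dom_apply_insertion genome element position → Spec_apply_insertion genome element position (apply_insertion genome element position)

-- ===== LEMMAS AND PROOFS =====

-- B's computation generalized over the running offset t (proof helper; at t = 0 it is apply_insertion_alt)
def pvBform (e pos : Int) (g : List (List Int)) (t : Int) : List (List Int) :=
  let cum := pvCum g t
  let lo := pvBisect cum pos 0 cum.length
  if lo < g.length then
    g.set lo
      (PySem.List.insert (g.getD lo [])
        (pos - (cum.getD lo 0 - ((g.getD lo []).length : Int))) e)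
  else g

-- characterization of the bisect_right result: r is the first index whose entry exceeds pos
def pvGood (cum : List Int) (pos : Int) (r : Nat) : Prop :=
  r ≤ cum.length ∧ (∀ i, i < r → cum.getD i 0 ≤ pos) ∧ (r < cum.length → pos < cum.getD r 0)

theorem pvGood_unique {cum : List Int} {pos : Int} {r1 r2 : Nat}
    (h1 : pvGood cum pos r1) (h2 : pvGood cum pos r2) : r1 = r2 := by
  obtain ⟨hl1, hle1, hgt1⟩ := h1
  obtain ⟨hl2, hle2, hgt2⟩ := h2
  by_contra hne
  rcases Nat.lt_or_ge r1 r2 with h | h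
  · have := hle2 r1 h
    have := hgt1 (lt_of_lt_of_le h hl2)
    omega
  · have hlt : r2 < r1 := by omega
    have := hle1 r2 hlt
    have := hgt2 (lt_of_lt_of_le hlt hl1)
    omega

theorem pvCum_length (g : List (List Int)) (t : Int) : (pvCum g t).length = g.length := by
  induction g generalizing t with
  | nil => rfl
  | cons c rest ih => simp [pvCum, ih]

-- every entry of pvCum g t is at least t
theorem pvCum_ge (g : List (List Int)) (t : Int) : ∀ x ∈ pvCum g t, t ≤ x := by
  induction g generalizing t with
  | nil => simp [pvCum]
  | cons c rest ih =>
    intro x hx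
    simp only [pvCum, List.mem_cons] at hx
    rcases hx with h | h
    · have : (0 : Int) ≤ (c.length : Int) := Int.natCast_nonneg _
      omega
    · have := ih (t + (c.length : Int)) x h
      have : (0 : Int) ≤ (c.length : Int) := Int.natCast_nonneg _
      omega

-- monotonicity of cum (needed for the binary-search invariant)
theorem pvCum_mono (g : List (List Int)) (t : Int) :
    ∀ i j, i ≤ j → j < (pvCum g t).length → (pvCum g t).getD i 0 ≤ (pvCum g t).getD j 0 := by
  induction g generalizing t with
  | nil => intro i j _ hj; simp [pvCum] at hj
  | cons c rest ih =>
    intro i j hij hj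
    cases i with
    | zero =>
      cases j with
      | zero => exact le_refl _
      | succ j' =>
        simp only [pvCum, List.length_cons, List.getD_cons_zero, List.getD_cons_succ] at *
        have hj' : j' < (pvCum rest (t + (c.length : Int))).length := by omega
        have hmem : (pvCum rest (t + (c.length : Int))).getD j' 0 ∈ pvCum rest (t + (c.length : Int)) := by
          rw [List.getD_eq_getElem _ _ hj']
          exact List.getElem_mem hj'
        exact pvCum_ge rest (t + (c.length : Int)) _ hmem
    | succ i' =>
      cases j with
      | zero => omega
      | succ j' =>
        simp only [pvCum, List.length_cons, List.getD_cons_succ] at *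
        exact ih (t + (c.length : Int)) i' j' (by omega) (by omega)

-- the binary-search loop invariant: everything left of lo is ≤ pos, everything at/after hi is > pos
theorem pvBisect_inv (cum : List Int) (pos : Int)
    (hmono : ∀ i j, i ≤ j → j < cum.length → cum.getD i 0 ≤ cum.getD j 0) :
    ∀ n lo hi, hi - lo = n → lo ≤ hi → hi ≤ cum.length →
      (∀ i, i < lo → cum.getD i 0 ≤ pos) →
      (∀ i, hi ≤ i → i < cum.length → pos < cum.getD i 0) →
      pvGood cum pos (pvBisect cum pos lo hi) := by
  intro n
  induction n using Nat.strong_induction_on with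
  | _ n IH =>
    intro lo hi hn hlohi hhi hinvlo hinvhi
    rw [pvBisect]
    by_cases hlt : lo < hi
    · simp only [hlt, if_true]
      by_cases hm : cum.getD ((lo + hi) / 2) 0 ≤ pos
      · simp only [hm, if_true]
        exact IH (hi - ((lo + hi) / 2 + 1)) (by omega) _ _ rfl (by omega) hhi
          (fun i hi' => le_trans (hmono i ((lo + hi) / 2) (by omega) (by omega)) hm)
          hinvhi
      · simp only [hm, if_false]
        exact IH ((lo + hi) / 2 - lo) (by omega) _ _ rfl (by omega) (by omega) hinvlo
          (fun i hi1 hi2 =>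
            lt_of_lt_of_le (by omega : pos < cum.getD ((lo + hi) / 2) 0)
              (hmono ((lo + hi) / 2) i hi1 hi2))
    · simp only [hlt, if_false]
      have : lo = hi := by omega
      exact ⟨by omega, hinvlo, fun h => hinvhi lo (by omega) h⟩

theorem pvBisect_good (cum : List Int) (pos : Int)
    (hmono : ∀ i j, i ≤ j → j < cum.length → cum.getD i 0 ≤ cum.getD j 0) :
    pvGood cum pos (pvBisect cum pos 0 cum.length) :=
  pvBisect_inv cum pos hmono _ 0 cum.length rfl (Nat.zero_le _) (le_refl _)
    (by omega) (by omega)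

-- the main equivalence, generalized over the running offset
theorem pvInsA_eq_Bform (e pos : Int) (g : List (List Int)) (t : Int) :
    pvInsA e pos g t = pvBform e pos g t := by
  induction g generalizing t with
  | nil =>
    rw [pvBform, pvInsA]
    simp [pvCum, pvBisect]
  | cons c rest ih =>
    have hg : pvGood (pvCum (c :: rest) t) pos
        (pvBisect (pvCum (c :: rest) t) pos 0 (pvCum (c :: rest) t).length) :=
      pvBisect_good _ _ (pvCum_mono (c :: rest) t)
    by_cases hpos : t + (c.length : Int) > pos
    · -- target is the head chromosome: the bisect result is 0
      have h0 : pvGood (pvCum (c :: rest) t) pos 0 := by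
        refine ⟨Nat.zero_le _, by omega, fun h => ?_⟩
        simp [pvCum]
        omega
      have hr := pvGood_unique hg h0
      rw [pvInsA, pvBform, hr]
      simp only [pvCum, List.length_cons, if_pos hpos, List.getD_cons_zero, List.set]
      have hlen : 0 < rest.length + 1 := by omega
      rw [if_pos hlen]
      have harith : pos - (t + (c.length : Int) - (c.length : Int)) = pos - t := by ring
      rw [harith]
    · -- target is in the tail: the bisect result is one more than on the tail
      have hle : t + (c.length : Int) ≤ pos := by omega
      set cum' := pvCum rest (t + (c.length : Int)) with hcum'
      have hg' : pvGood cum' pos (pvBisect cum' pos 0 cum'.length) :=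
        pvBisect_good _ _ (pvCum_mono rest (t + (c.length : Int)))
      set r' := pvBisect cum' pos 0 cum'.length with hr'
      have hsucc : pvGood (pvCum (c :: rest) t) pos (r' + 1) := by
        obtain ⟨h1, h2, h3⟩ := hg'
        refine ⟨?_, ?_, ?_⟩
        · simp only [pvCum, List.length_cons, ← hcum']
          omega
        · intro i hi
          cases i with
          | zero => simpa [pvCum] using hle
          | succ i' =>
            simp only [pvCum, List.getD_cons_succ, ← hcum']
            exact h2 i' (by omega)
        · intro h
          simp only [pvCum, List.length_cons, List.getD_cons_succ, ← hcum'] at h ⊢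
          exact h3 (by omega)
      have hr := pvGood_unique hg hsucc
      rw [pvInsA, pvBform, hr]
      rw [if_neg hpos]
      rw [ih (t + (c.length : Int))]
      rw [pvBform]
      simp only [← hr', ← hcum']
      have hlen' : cum'.length = rest.length := pvCum_length rest _
      by_cases hcase : r' < rest.length
      · rw [if_pos hcase]
        have h2 : r' + 1 < (c :: rest).length := by
          simp only [List.length_cons]; omega
        rw [if_pos h2]
        simp [pvCum, ← hcum', List.set]
      · rw [if_neg hcase]
        have h2 : ¬ (r' + 1 < (c :: rest).length) := by
          simp only [List.length_cons]; omega
        rw [if_neg h2]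

-- ===== VERDICT (by name: the statement is the Claim_ definition above) =====
theorem apply_insertion_spec : Claim_equal_apply_insertion := by
  intro genome element position _
  unfold Spec_apply_insertion apply_insertion apply_insertion_alt
  exact pvInsA_eq_Bform element position genome 0
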